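-- pv_equiv track=rewrite | github.com/josteint/sidfinity | src/converters/gt2_to_usf.py | _decode_orderlist
-- ===== SOURCE A (Python) =====
-- def _decode_orderlist(ol_bytes):
--     """Decode GT2 packed orderlist bytes into (pattern_id, transpose) list + restart index."""
--     entries = []
--     current_trans = 0
--     restart = 0
--     p = 0
--
--     while p < len(ol_bytes):
--         byte = ol_bytes[p]
--
--         if byte == 0xFF:
--             # End marker — next byte is restart position
--             if p + 1 < len(ol_bytes):
--                 restart_byte = ol_bytes[p + 1]
--                 # Convert byte offset to entry index
--                 byte_to_entry = {}
--                 entry_idx = 0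
--                 scan = 0
--                 while scan < p:
--                     b = ol_bytes[scan]
--                     if b >= 0xE0:
--                         scan += 1
--                         continue
--                     elif b >= 0xD0:
--                         scan += 1
--                         continue
--                     else:
--                         byte_to_entry[scan] = entry_idx
--                         entry_idx += 1
--                         scan += 1
--                 restart = byte_to_entry.get(restart_byte, 0)
--             break
--
--         if byte >= 0xF0:
--             current_trans = byte - 0xF0
--             p += 1
--             continue
--         if byte >= 0xE0:
--             current_trans = byte - 256 + 16  # negative transpose
--             p += 1
--             continue
--         if byte >= 0xD0:
--             # Repeat: previous entry repeated (byte - 0xD0) more times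
--             count = byte - 0xD0
--             if entries:
--                 for _ in range(count):
--                     entries.append(entries[-1])
--             p += 1
--             continue
--
--         # Pattern ID
--         entries.append((byte, current_trans))
--         p += 1
--
--     return entries, restart
-- ===== SOURCE B (Python) =====
-- def _decode_orderlist(ol_bytes):
--     """Decode GT2 packed orderlist bytes into (pattern_id, transpose) list + restart index."""
--     # Locate the 0xFF end marker; the bytes before it form the body.
--     end = next((i for i, b in enumerate(ol_bytes) if b == 0xFF), len(ol_bytes))
--     body = ol_bytes[:end]
--
--     # Stage 1: transpose in effect at each body position (prefix scan).
--     trans = []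
--     t = 0
--     for b in body:
--         if b >= 0xE0:
--             t = b - 0xF0
--         trans.append(t)
--
--     # Stage 2: last pattern entry at or before each position (prefix scan).
--     last = []
--     cur = None
--     for p, b in enumerate(body):
--         if b < 0xD0:
--             cur = (b, trans[p])
--         last.append(cur)
--
--     # Stage 3: stateless per-position emission.
--     entries = []
--     for p, b in enumerate(body):
--         if b < 0xD0:
--             entries.append((b, trans[p]))
--         elif b < 0xE0 and last[p] is not None:
--             entries += [last[p]] * (b - 0xD0)
--
--     # Restart: count the pattern bytes before the referenced body position.
--     restart = 0
--     if end + 1 < len(ol_bytes):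
--         rb = ol_bytes[end + 1]
--         if 0 <= rb < end and body[rb] < 0xD0:
--             restart = sum(1 for x in body[:rb] if x < 0xD0)
--     return entries, restart
-- ===== Notes on version B (the rewrite author's own statement) =====
-- stated objective: alternative
-- what changed: B replaces A's single stateful while-loop (with a nested dict-building rescan at the 0xFF marker) by staged passes: locate the end marker, prefix-scan the transpose in effect per position, prefix-scan the last pattern entry per position, then a stateless per-position emission pass, with the restart index obtained by an arithmetic count of pattern bytes instead of A's rescan dict.
import Mathlib
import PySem

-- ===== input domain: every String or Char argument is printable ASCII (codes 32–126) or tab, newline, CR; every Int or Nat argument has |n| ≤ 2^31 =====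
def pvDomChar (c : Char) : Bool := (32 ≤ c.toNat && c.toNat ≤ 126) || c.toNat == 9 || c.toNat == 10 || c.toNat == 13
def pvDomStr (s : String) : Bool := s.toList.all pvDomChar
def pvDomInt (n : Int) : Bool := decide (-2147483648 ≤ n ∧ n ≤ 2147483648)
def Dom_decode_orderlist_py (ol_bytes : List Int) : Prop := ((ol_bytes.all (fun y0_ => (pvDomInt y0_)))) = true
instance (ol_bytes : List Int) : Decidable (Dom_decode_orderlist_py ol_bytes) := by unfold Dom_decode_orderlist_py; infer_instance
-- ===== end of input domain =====

-- B restructures A's single stateful while-loop (with its nested rescan at 0xFF) into staged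
-- passes: end-marker search, two prefix scans, a stateless emission pass, and an arithmetic
-- count for the restart index; objective: alternative.

-- ===== PORT A =====
-- inner rescan: while scan < p building byte_to_entry (keys are positions)
def aScan (ol : List Int) (p scan : Nat) (d : PySem.Dict Int Int) (idx : Int) :
    PySem.Dict Int Int :=
  if _h : scan < p then
    let b := ol.getD scan 0          -- ol_bytes[scan], in range since scan < p < len at call sites
    if b ≥ 224 then aScan ol p (scan + 1) d idx
    else if b ≥ 208 then aScan ol p (scan + 1) d idx
    else aScan ol p (scan + 1) (d.insert (scan : Int) idx) (idx + 1)
  else d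
termination_by p - scan

-- main while loop of A
def aLoop (ol : List Int) (entries : List (Int × Int)) (trans restart : Int) (p : Nat) :
    (List (Int × Int)) × Int :=
  if _h : p < ol.length then
    let byte := ol.getD p 0          -- ol_bytes[p], in range
    if byte = 255 then
      if p + 1 < ol.length then
        (entries, (aScan ol p 0 PySem.Dict.empty 0).getD (ol.getD (p + 1) 0) 0)
      else (entries, restart)
    else if byte ≥ 240 then aLoop ol entries (byte - 240) restart (p + 1)
    else if byte ≥ 224 then aLoop ol entries (byte - 256 + 16) restart (p + 1)
    else if byte ≥ 208 then
      aLoop ol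
        (if entries ≠ [] then
          (PySem.List.pyRange 0 (byte - 208) 1).foldl
            (fun es _ => es ++ [PySem.List.pyGetD es (-1) ((0 : Int), (0 : Int))]) entries
         else entries)
        trans restart (p + 1)
    else aLoop ol (entries ++ [(byte, trans)]) trans restart (p + 1)
  else (entries, restart)
termination_by ol.length - p

def decode_orderlist_py (ol_bytes : List Int) : (List (Int × Int)) × Int :=
  aLoop ol_bytes [] 0 0 0

-- ===== PORT B =====
-- stage 1: transpose in effect at each body position (append loop → structural recursion)
def bTrans : List Int → Int → List Int
  | [], _ => []
  | b :: rest, t =>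
      let t' := if b ≥ 224 then b - 240 else t
      t' :: bTrans rest t'

-- stage 2: last pattern entry at or before each position (loop over body zipped with trans)
def bLast : List (Int × Int) → Option (Int × Int) → List (Option (Int × Int))
  | [], _ => []
  | (b, tr) :: rest, cur =>
      let cur' := if b < 208 then some (b, tr) else cur
      cur' :: bLast rest cur'

-- stage 3: stateless per-position emission (body zipped with trans and last)
def bEmit : List (Int × Int × Option (Int × Int)) → List (Int × Int)
  | [] => []
  | (b, tr, lastp) :: rest =>
      (if b < 208 then [(b, tr)]
       else if b < 224 then
         match lastp with
         | some e => List.replicate (b - 208).toNat e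
         | none => []
       else []) ++ bEmit rest

def decode_orderlist_py_alt (ol_bytes : List Int) : (List (Int × Int)) × Int :=
  -- end = first index of 0xFF (or len); body = ol_bytes[:end]
  let e := (PySem.List.index? ol_bytes 255).getD ol_bytes.length
  let body := ol_bytes.take e
  let trans := bTrans body 0
  let lasts := bLast (body.zip trans) none
  let entries := bEmit (body.zip (trans.zip lasts))
  let restart : Int :=
    if e + 1 < ol_bytes.length then
      let rb := ol_bytes.getD (e + 1) 0
      if 0 ≤ rb ∧ rb < (e : Int) ∧ body.getD rb.toNat 0 < 208 then
        (body.take rb.toNat).foldl (fun acc x => if x < 208 then acc + 1 else acc) 0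
      else 0
    else 0
  (entries, restart)

-- ===== PRECONDITION & SPEC =====
def Spec_decode_orderlist_py (ol_bytes : List Int) (out : (List (Int × Int)) × Int) : Prop := out = decode_orderlist_py_alt ol_bytes
instance (ol_bytes : List Int) (out : (List (Int × Int)) × Int) : Decidable (Spec_decode_orderlist_py ol_bytes out) := by unfold Spec_decode_orderlist_py; infer_instance

-- ===== CLAIM (what is proved, stated in full; the proofs are below) =====
def Claim_equal_decode_orderlist_py : Prop := ∀ (ol_bytes : List Int), Dom_decode_orderlist_py ol_bytes → Spec_decode_orderlist_py ol_bytes (decode_orderlist_py ol_bytes)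

-- ===== LEMMAS AND PROOFS =====

-- proof-only: one step of A's main loop, with the repeat loop already summed to a replicate
def pvStep (st : (List (Int × Int)) × Int) (b : Int) : (List (Int × Int)) × Int :=
  if b ≥ 240 then (st.1, b - 240)
  else if b ≥ 224 then (st.1, b - 240)
  else if b ≥ 208 then
    (if st.1 ≠ [] then
       st.1 ++ List.replicate (b - 208).toNat (PySem.List.pyGetD st.1 (-1) ((0 : Int), (0 : Int)))
     else st.1, st.2)
  else (st.1 ++ [(b, st.2)], st.2)

-- A's repeat loop equals a replicate of entries[-1]
theorem repeat_foldl_eq_replicate (z : Int × Int) :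
    ∀ (l : List Int) (es : List (Int × Int)), es ≠ [] →
      l.foldl (fun es (_ : Int) => es ++ [PySem.List.pyGetD es (-1) z]) es
        = es ++ List.replicate l.length (PySem.List.pyGetD es (-1) z) := by
  intro l
  induction l with
  | nil => intro es _; simp
  | cons a t ih =>
    intro es hes
    have hne : es ++ [PySem.List.pyGetD es (-1) z] ≠ [] := by simp
    simp only [List.foldl_cons]
    rw [ih _ hne, PySem.List.pyGetD_neg_one_append_singleton]
    simp [List.replicate_succ, List.append_assoc]

theorem repeat_pyRange_eq_replicate (c : Int) (es : List (Int × Int)) (hes : es ≠ []) :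
    (PySem.List.pyRange 0 c 1).foldl
        (fun es _ => es ++ [PySem.List.pyGetD es (-1) ((0 : Int), (0 : Int))]) es
      = es ++ List.replicate c.toNat (PySem.List.pyGetD es (-1) ((0 : Int), (0 : Int))) := by
  have h := repeat_foldl_eq_replicate ((0 : Int), (0 : Int)) (PySem.List.pyRange 0 c 1) es hes
  rwa [PySem.List.length_pyRange_one, Int.sub_zero] at h

-- B's counting fold is countP
theorem count_foldl_eq_countP : ∀ (l : List Int) (acc : Int),
    l.foldl (fun acc x => if x < 208 then acc + 1 else acc) acc
      = acc + (l.countP (fun x => decide (x < 208)) : Int) := by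
  intro l
  induction l with
  | nil => intro acc; simp
  | cons a t ih =>
    intro acc
    by_cases h : a < 208
    · simp only [List.foldl_cons, List.countP_cons, h, decide_true, if_true]
      rw [ih]
      push_cast; ring
    · simp only [List.foldl_cons, List.countP_cons, h, decide_false, if_false]
      rw [ih]
      simp

-- invariant of A's rescan dict
theorem aScan_getD (ol : List Int) (p : Nat) (hp : p ≤ ol.length) :
    ∀ (m scan : Nat) (d : PySem.Dict Int Int) (idx : Int), p - scan = m → ∀ (rb : Int),
      (aScan ol p scan d idx).getD rb 0 =
        if (scan : Int) ≤ rb ∧ rb < (p : Int) ∧ ol.getD rb.toNat 0 < 208 then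
          idx + (((ol.drop scan).take (rb.toNat - scan)).countP (fun x => decide (x < 208)) : Int)
        else d.getD rb 0 := by
  intro m
  induction m with
  | zero =>
    intro scan d idx hm rb
    have hsp : ¬ scan < p := by omega
    rw [aScan]
    simp only [hsp, dif_neg, not_false_iff]
    rw [if_neg]
    rintro ⟨h1, h2, _⟩
    omega
  | succ n ih =>
    intro scan d idx hm rb
    have hsp : scan < p := by omega
    have hsl : scan < ol.length := by omega
    have hdrop : ol.drop scan = ol[scan] :: ol.drop (scan + 1) := List.drop_eq_getElem_cons hsl
    have hget : ol.getD scan 0 = ol[scan] := by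
      rw [List.getD_eq_getElem?_getD, List.getElem?_eq_getElem hsl]; rfl
    rw [aScan]
    simp only [hsp, dif_pos]
    by_cases hb1 : ol.getD scan 0 ≥ 224
    · rw [if_pos hb1, ih (scan + 1) d idx (by omega) rb]
      by_cases hc : ((scan + 1 : Nat) : Int) ≤ rb ∧ rb < (p : Int) ∧ ol.getD rb.toNat 0 < 208
      · rw [if_pos hc, if_pos (by push_cast at hc ⊢; omega)]
        have hm2 : rb.toNat - scan = (rb.toNat - (scan + 1)) + 1 := by omega
        rw [hdrop, hm2, List.take_succ_cons, List.countP_cons]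
        have : ¬ (ol[scan] < 208) := by omega
        simp [this]
      · rw [if_neg hc, if_neg]
        intro hc'
        apply hc
        have : rb ≠ (scan : Int) := by
          intro he
          have : ol.getD rb.toNat 0 = ol.getD scan 0 := by rw [he]; simp
          omega
        omega
    · rw [if_neg hb1]
      by_cases hb2 : ol.getD scan 0 ≥ 208
      · rw [if_pos hb2, ih (scan + 1) d idx (by omega) rb]
        by_cases hc : ((scan + 1 : Nat) : Int) ≤ rb ∧ rb < (p : Int) ∧ ol.getD rb.toNat 0 < 208
        · rw [if_pos hc, if_pos (by push_cast at hc ⊢; omega)]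
          have hm2 : rb.toNat - scan = (rb.toNat - (scan + 1)) + 1 := by omega
          rw [hdrop, hm2, List.take_succ_cons, List.countP_cons]
          have : ¬ (ol[scan] < 208) := by omega
          simp [this]
        · rw [if_neg hc, if_neg]
          intro hc'
          apply hc
          have : rb ≠ (scan : Int) := by
            intro he
            have : ol.getD rb.toNat 0 = ol.getD scan 0 := by rw [he]; simp
            omega
          omega
      · rw [if_neg hb2, ih (scan + 1) _ _ (by omega) rb]
        by_cases heq : rb = (scan : Int)
        · have hpat : ol.getD rb.toNat 0 < 208 := by
            rw [heq]; simpa using (by omega : ol.getD scan 0 < 208)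
          rw [if_neg (by omega), if_pos ⟨by omega, by omega, hpat⟩]
          have : rb.toNat - scan = 0 := by omega
          rw [this]
          simp [heq, PySem.Dict.getD_insert_self]
        · by_cases hc : ((scan + 1 : Nat) : Int) ≤ rb ∧ rb < (p : Int) ∧ ol.getD rb.toNat 0 < 208
          · rw [if_pos hc, if_pos (by push_cast at hc ⊢; omega)]
            have hm2 : rb.toNat - scan = (rb.toNat - (scan + 1)) + 1 := by omega
            rw [hdrop, hm2, List.take_succ_cons, List.countP_cons]
            have : ol[scan] < 208 := by omega
            simp [this]
            ring
          · rw [if_neg hc, if_neg (by omega), PySem.Dict.getD_insert,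
                if_neg heq]

-- the restart value A computes at the 0xFF marker, as B computes it (on the full list)
theorem restart_eq (ol : List Int) (q : Nat) (hq : q ≤ ol.length) :
    (aScan ol q 0 PySem.Dict.empty 0).getD (ol.getD (q + 1) 0) 0 =
      (if 0 ≤ ol.getD (q + 1) 0 ∧ ol.getD (q + 1) 0 < (q : Int) ∧
            ol.getD (ol.getD (q + 1) 0).toNat 0 < 208 then
        (ol.take (ol.getD (q + 1) 0).toNat).foldl
          (fun acc x => if x < 208 then acc + 1 else acc) 0
      else 0) := by
  rw [aScan_getD ol q hq q 0 PySem.Dict.empty 0 (by omega) (ol.getD (q + 1) 0)]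
  by_cases hc : (0 : Int) ≤ ol.getD (q + 1) 0 ∧ ol.getD (q + 1) 0 < (q : Int) ∧
      ol.getD (ol.getD (q + 1) 0).toNat 0 < 208
  · rw [if_pos (by simpa using hc), if_pos hc, count_foldl_eq_countP]
    simp
  · rw [if_neg (by simpa using hc), if_neg hc, PySem.Dict.getD_empty]

-- A's fold of pvStep equals B's staged passes (entries component)
theorem foldl_step_eq_staged : ∀ (body : List Int) (es : List (Int × Int)) (t : Int),
    (body.foldl pvStep (es, t)).1
      = es ++ bEmit (body.zip ((bTrans body t).zip
          (bLast (body.zip (bTrans body t)) es.getLast?))) := by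
  intro body
  induction body with
  | nil => intro es t; simp [bEmit]
  | cons b rest ih =>
    intro es t
    simp only [List.foldl_cons, bTrans, List.zip_cons_cons, bLast, bEmit]
    by_cases h240 : b ≥ 240
    · have h224 : b ≥ 224 := by omega
      have hs : pvStep (es, t) b = (es, b - 240) := by
        simp only [pvStep, if_pos h240]
      rw [hs, ih es (b - 240)]
      simp only [h224, if_pos, if_neg (by omega : ¬ b < 208), if_neg (by omega : ¬ b < 224)]
      simp
    · by_cases h224 : b ≥ 224
      · have hs : pvStep (es, t) b = (es, b - 240) := by
          simp only [pvStep, if_neg h240, if_pos h224]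
        rw [hs, ih es (b - 240)]
        simp only [if_pos h224, if_neg (by omega : ¬ b < 208), if_neg (by omega : ¬ b < 224)]
        simp
      · by_cases h208 : b ≥ 208
        · simp only [if_neg h224, if_neg (by omega : ¬ b < 208), if_pos (by omega : b < 224)]
          by_cases he : es = []
          · have hs : pvStep (es, t) b = (es, t) := by
              simp only [pvStep, if_neg h240, if_neg h224, if_pos h208, he]
              simp
            rw [hs, ih es t, he]
            simp
          · have hlast : es.getLast? = some (es.getLast he) := List.getLast?_eq_some_getLast he
            have hpg : PySem.List.pyGetD es (-1) ((0 : Int), (0 : Int)) = es.getLast he :=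
              PySem.List.pyGetD_neg_one es ((0 : Int), (0 : Int)) he
            set k := (b - 208).toNat with hk
            set e := es.getLast he with hee
            have hs : pvStep (es, t) b = (es ++ List.replicate k e, t) := by
              simp only [pvStep, if_neg h240, if_neg h224, if_pos h208, hpg]
              rw [if_pos he]
            have hlast' : (es ++ List.replicate k e).getLast? = some e := by
              cases k with
              | zero => simpa using hlast
              | succ m =>
                rw [List.getLast?_append]
                simp [List.getLast?_replicate]
            rw [hs, ih (es ++ List.replicate k e) t, hlast', hlast]
            simp [List.append_assoc]
        · have hb : b < 208 := by omega
          have hs : pvStep (es, t) b = (es ++ [(b, t)], t) := by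
            simp only [pvStep, if_neg h240, if_neg h224, if_neg h208]
          rw [hs, ih (es ++ [(b, t)]) t]
          simp only [if_neg h224, if_pos hb, List.getLast?_concat]
          simp [List.append_assoc]

-- the shape A's loop state reaches from position p, phrased with the pvStep fold
def pvRhs (ol : List Int) (es : List (Int × Int)) (tr r : Int) (p : Nat) :
    (List (Int × Int)) × Int :=
  match PySem.List.index? (ol.drop p) 255 with
  | none => (((ol.drop p).foldl pvStep (es, tr)).1, r)
  | some k =>
      ((((ol.drop p).take k).foldl pvStep (es, tr)).1,
       if p + k + 1 < ol.length then
         (aScan ol (p + k) 0 PySem.Dict.empty 0).getD (ol.getD (p + k + 1) 0) 0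
       else r)

theorem pvRhs_cons (ol : List Int) (es : List (Int × Int)) (tr r : Int) (p : Nat)
    (hpl : p < ol.length) (h255 : ol[p] ≠ 255) :
    pvRhs ol es tr r p
      = pvRhs ol (pvStep (es, tr) ol[p]).1 (pvStep (es, tr) ol[p]).2 r (p + 1) := by
  unfold pvRhs
  rw [List.drop_eq_getElem_cons hpl, PySem.List.index?_cons_of_ne _ h255]
  cases hcase : PySem.List.index? (ol.drop (p + 1)) 255 with
  | none => simp only [Option.map_none, List.foldl_cons]
  | some k =>
    simp only [Option.map_some, List.take_succ_cons, List.foldl_cons]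
    have h1 : p + (k + 1) = p + 1 + k := by omega
    rw [h1]

-- main loop characterisation
theorem aLoop_eq (ol : List Int) :
    ∀ (n p : Nat) (es : List (Int × Int)) (tr r : Int), ol.length - p = n →
      aLoop ol es tr r p = pvRhs ol es tr r p := by
  intro n
  induction n with
  | zero =>
    intro p es tr r hn
    have hpl : ¬ p < ol.length := by omega
    have hdrop : ol.drop p = [] := List.drop_eq_nil_of_le (by omega)
    rw [aLoop]
    simp only [hpl, dif_neg, not_false_iff]
    unfold pvRhs
    rw [hdrop, PySem.List.index?_eq_idxOf?]
    simp
  | succ n ih =>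
    intro p es tr r hn
    have hpl : p < ol.length := by omega
    have hget : ol.getD p 0 = ol[p] := by
      rw [List.getD_eq_getElem?_getD, List.getElem?_eq_getElem hpl]; rfl
    rw [aLoop]
    simp only [hpl, dif_pos]
    by_cases h255 : ol.getD p 0 = 255
    · unfold pvRhs
      rw [List.drop_eq_getElem_cons hpl]
      have hi : PySem.List.index? (ol[p] :: ol.drop (p + 1)) 255 = some 0 := by
        rw [hget] at h255
        rw [h255, PySem.List.index?_cons_self]
      rw [hi]
      simp only [List.take_zero, List.foldl_nil]
      rw [if_pos h255]
      by_cases hlen : p + 1 < ol.length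
      · rw [if_pos hlen, if_pos (by omega : p + 0 + 1 < ol.length)]
        norm_num
      · rw [if_neg hlen, if_neg (by omega : ¬ p + 0 + 1 < ol.length)]
    · rw [if_neg h255, pvRhs_cons ol es tr r p hpl (by rw [hget] at h255; exact h255)]
      by_cases hb1 : ol.getD p 0 ≥ 240
      · rw [if_pos hb1, ih (p + 1) es (ol.getD p 0 - 240) r (by omega)]
        have hbs : pvStep (es, tr) ol[p] = (es, ol.getD p 0 - 240) := by
          rw [pvStep, if_pos (hget ▸ hb1), hget]
        rw [hbs]
      · rw [if_neg hb1]
        by_cases hb2 : ol.getD p 0 ≥ 224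
        · rw [if_pos hb2, ih (p + 1) es (ol.getD p 0 - 256 + 16) r (by omega)]
          have hbs : pvStep (es, tr) ol[p] = (es, ol.getD p 0 - 256 + 16) := by
            rw [pvStep, if_neg (by rw [hget] at hb1; simpa using hb1),
                if_pos (hget ▸ hb2)]
            simp only [hget, Prod.mk.injEq]
            exact ⟨trivial, by ring⟩
          rw [hbs]
        · by_cases hb3 : ol.getD p 0 ≥ 208
          · rw [if_neg hb2, if_pos hb3]
            set es' := (if es ≠ [] then
                (PySem.List.pyRange 0 (ol.getD p 0 - 208) 1).foldl
                  (fun es _ => es ++ [PySem.List.pyGetD es (-1) ((0 : Int), (0 : Int))]) es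
              else es) with hes'
            rw [ih (p + 1) es' tr r (by omega)]
            have hbs : pvStep (es, tr) ol[p] = (es', tr) := by
              rw [pvStep, if_neg (by rw [hget] at hb1; simpa using hb1),
                  if_neg (by rw [hget] at hb2; simpa using hb2),
                  if_pos (hget ▸ hb3)]
              rw [hes']
              by_cases he : es ≠ []
              · rw [if_pos he, repeat_pyRange_eq_replicate _ es he, hget]
                simp [he]
              · simp only [he, if_false]
            rw [hbs]
          · rw [if_neg hb2, if_neg hb3,
                ih (p + 1) (es ++ [(ol.getD p 0, tr)]) tr r (by omega)]
            have hbs : pvStep (es, tr) ol[p] = (es ++ [(ol.getD p 0, tr)], tr) := by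
              rw [pvStep, if_neg (by rw [hget] at hb1; simpa using hb1),
                  if_neg (by rw [hget] at hb2; simpa using hb2),
                  if_neg (by rw [hget] at hb3; simpa using hb3), hget]
            rw [hbs]

-- ===== VERDICT (by name: the statement is the Claim_ definition above) =====
theorem decode_orderlist_py_spec : Claim_equal_decode_orderlist_py := by
  unfold Claim_equal_decode_orderlist_py Spec_decode_orderlist_py
  intro ol _
  rw [decode_orderlist_py, aLoop_eq ol ol.length 0 [] 0 0 rfl]
  rw [decode_orderlist_py_alt]
  unfold pvRhs
  simp only [List.drop_zero, Nat.zero_add]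
  cases hidx : PySem.List.index? ol 255 with
  | none =>
    simp only [Option.getD_none, List.take_length]
    rw [if_neg (by omega), foldl_step_eq_staged]
    simp only [List.getLast?_nil, List.nil_append]
  | some k =>
    rcases PySem.List.getElem_of_index?_eq_some hidx with ⟨hk, -, -⟩
    simp only [Option.getD_some]
    rw [foldl_step_eq_staged]
    simp only [List.getLast?_nil, List.nil_append]
    by_cases hlen : k + 1 < ol.length
    · rw [if_pos hlen, if_pos hlen, restart_eq ol k (by omega)]
      by_cases hr : 0 ≤ ol.getD (k + 1) 0 ∧ ol.getD (k + 1) 0 < (k : Int)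
      · have hrn : (ol.getD (k + 1) 0).toNat < k := by omega
        have hgd : (ol.take k).getD (ol.getD (k + 1) 0).toNat 0
            = ol.getD (ol.getD (k + 1) 0).toNat 0 := by
          rw [List.getD_eq_getElem?_getD (l := ol.take k), List.getElem?_take_of_lt hrn,
              ← List.getD_eq_getElem?_getD]
        have htt : (ol.take k).take (ol.getD (k + 1) 0).toNat
            = ol.take (ol.getD (k + 1) 0).toNat := by
          rw [List.take_take, min_eq_left (by omega)]
        rw [hgd, htt]
      · rw [if_neg (by tauto), if_neg (by tauto)]
    · rw [if_neg hlen, if_neg hlen]
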